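-- pv_equiv track=rewrite | github.com/tom-e666/TensorTonic-Solutions | top-k-recommendations/top-k-recommendations.py | top_k_recommendations
-- ===== SOURCE A (Python) =====
-- def top_k_recommendations(scores, rated_indices, k):
--     """
--     Return indices of top-k unrated items by predicted score.
--     """
--     # Write code here
--     scores= list(enumerate(scores))
--     scores= sorted(scores, key = lambda x: x[1], reverse= True)
--     res=[]
--     for idx, score in scores:
--         if idx not in rated_indices:
--             res.append(idx)
--             if len(res) ==k:
--                 break
--     return res
-- ===== SOURCE B (Python) =====
-- def top_k_recommendations(scores, rated_indices, k):
--     """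
--     Return indices of top-k unrated items by predicted score.
--     Selection by repeated extraction: instead of sorting, pull the best
--     remaining candidate (ties -> lowest index) up to k times.
--     """
--     rated = set(rated_indices)
--     cand = [(i, s) for i, s in enumerate(scores) if i not in rated]
--     res = []
--     while len(res) < k and cand:
--         best = max(cand, key=lambda t: t[1])
--         res.append(best[0])
--         cand.remove(best)
--     return res
-- ===== Notes on version B (the rewrite author's own statement) =====
-- stated objective: alternative
-- what changed: B never sorts: it filters the unrated candidates once (hash-set membership) and then selects the top k by repeated max-extraction, instead of A's full descending sort followed by a scan with a per-item linear membership test and a break.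
-- intended difference: For k <= 0 with at least one unrated index, A returns ALL unrated indices (its len(res)==k break can never fire) while B returns the empty list, which is the intended meaning of top-k for non-positive k. — e.g. on top_k_recommendations([5], [], 0): A returns [0], B returns []
import Mathlib
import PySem

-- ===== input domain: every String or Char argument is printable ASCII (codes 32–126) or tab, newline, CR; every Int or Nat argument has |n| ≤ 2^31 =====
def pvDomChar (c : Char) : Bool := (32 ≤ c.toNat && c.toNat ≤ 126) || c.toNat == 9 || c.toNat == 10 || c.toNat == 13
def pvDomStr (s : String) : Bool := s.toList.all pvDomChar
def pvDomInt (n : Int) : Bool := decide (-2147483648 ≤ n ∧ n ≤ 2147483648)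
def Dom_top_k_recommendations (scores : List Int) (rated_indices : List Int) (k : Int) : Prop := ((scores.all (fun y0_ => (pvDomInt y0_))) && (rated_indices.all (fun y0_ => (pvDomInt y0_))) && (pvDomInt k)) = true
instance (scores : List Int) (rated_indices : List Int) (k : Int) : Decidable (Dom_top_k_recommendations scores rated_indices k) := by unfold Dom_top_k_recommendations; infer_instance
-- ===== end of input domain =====

-- B selects the top k by repeated max-extraction from the once-filtered candidate list instead of
-- A's full descending sort followed by a scan with a per-item linear membership test; objective:
-- alternative algorithm (no sort at all).

-- ===== PORT A =====
-- the for-loop of A: append unrated indices, break as soon as len(res) == k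
def pvLoopA (rated_indices : List Int) (k : Int) : List (Int × Int) → List Int → List Int
  | [], res => res
  | (idx, _score) :: rest, res =>
    if idx ∉ rated_indices then
      let res' := res ++ [idx]
      if (res'.length : Int) = k then res' else pvLoopA rated_indices k rest res'
    else pvLoopA rated_indices k rest res

def top_k_recommendations (scores : List Int) (rated_indices : List Int) (k : Int) : List Int :=
  let scores1 := PySem.List.enumerate scores 0
  let scores2 := PySem.List.sorted scores1 (fun x => x.2) true
  pvLoopA rated_indices k scores2 []

-- ===== PORT B =====
-- termination helper for the while-loop: cand.remove(best) shrinks the candidate list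
theorem pvRemove?_length_lt {xs ys : List (Int × Int)} {v : Int × Int}
    (h : PySem.List.remove? xs v = some ys) : ys.length < xs.length := by
  have hv : v ∈ xs := by
    by_contra hv
    rw [(PySem.List.remove?_eq_none_iff xs v).mpr hv] at h
    simp at h
  rw [PySem.List.remove?_eq_some_erase xs v hv] at h
  injection h with h
  subst h
  have hlen := List.length_erase_of_mem hv
  have hpos : 0 < xs.length := List.length_pos_of_mem hv
  omega

-- the while-loop of B: extract the max-by-score candidate while len(res) < k and cand remains
def pvLoopB (k : Int) (cand : List (Int × Int)) (res : List Int) : List Int :=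
  if (res.length : Int) < k ∧ cand ≠ [] then
    match _hm : PySem.List.max? cand (fun t => t.2) with
    | none => res
    | some best =>
      match hr : PySem.List.remove? cand best with
      | none => res
      | some cand' => pvLoopB k cand' (res ++ [best.1])
  else res
termination_by cand.length
decreasing_by exact pvRemove?_length_lt hr

def top_k_recommendations_alt (scores : List Int) (rated_indices : List Int) (k : Int) : List Int :=
  let rated := PySem.Set.ofList rated_indices
  let cand := (PySem.List.enumerate scores 0).filter (fun t => decide (t.1 ∉ rated))
  pvLoopB k cand []

-- ===== PRECONDITION & SPEC =====
-- For k ≤ 0 with at least one unrated index, A returns ALL unrated indices (its len(res)==k break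
-- can never fire) while B returns [], the intended meaning of top-k for non-positive k.
def D_top_k_recommendations (scores : List Int) (rated_indices : List Int) (k : Int) : Prop :=
  k ≤ 0 ∧ ∃ i ∈ List.range scores.length, (i : Int) ∉ rated_indices
instance (scores : List Int) (rated_indices : List Int) (k : Int) : Decidable (D_top_k_recommendations scores rated_indices k) := by unfold D_top_k_recommendations; infer_instance

def Spec_top_k_recommendations (scores : List Int) (rated_indices : List Int) (k : Int) (out : List Int) : Prop := ¬ D_top_k_recommendations scores rated_indices k → out = top_k_recommendations_alt scores rated_indices k
instance (scores : List Int) (rated_indices : List Int) (k : Int) (out : List Int) : Decidable (Spec_top_k_recommendations scores rated_indices k out) := by unfold Spec_top_k_recommendations; infer_instance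

def pvDiffWitness_top_k_recommendations : List Int × List Int × Int := ([5], [], 0)
def pvDiffWitnessOut_top_k_recommendations : (List Int) × (List Int) := ([0], [])

-- ===== CLAIM (what is proved, stated in full; the proofs are below) =====
def Claim_unchanged_top_k_recommendations : Prop := ∀ (scores : List Int) (rated_indices : List Int) (k : Int), Dom_top_k_recommendations scores rated_indices k → Spec_top_k_recommendations scores rated_indices k (top_k_recommendations scores rated_indices k)
def Claim_changed_top_k_recommendations : Prop := Dom_top_k_recommendations (pvDiffWitness_top_k_recommendations.1) (pvDiffWitness_top_k_recommendations.2.1) (pvDiffWitness_top_k_recommendations.2.2) ∧ D_top_k_recommendations (pvDiffWitness_top_k_recommendations.1) (pvDiffWitness_top_k_recommendations.2.1) (pvDiffWitness_top_k_recommendations.2.2) ∧ top_k_recommendations (pvDiffWitness_top_k_recommendations.1) (pvDiffWitness_top_k_recommendations.2.1) (pvDiffWitness_top_k_recommendations.2.2) = pvDiffWitnessOut_top_k_recommendations.1 ∧ top_k_recommendations_alt (pvDiffWitness_top_k_recommendations.1) (pvDiffWitness_top_k_recommendations.2.1) (pvDiffWitness_top_k_recommendations.2.2) = pvDiffWitnessOut_top_k_recommendations.2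 ∧ pvDiffWitnessOut_top_k_recommendations.1 ≠ pvDiffWitnessOut_top_k_recommendations.2
def Claim_exact_top_k_recommendations : Prop := ∀ (scores : List Int) (rated_indices : List Int) (k : Int), Dom_top_k_recommendations scores rated_indices k → D_top_k_recommendations scores rated_indices k → top_k_recommendations scores rated_indices k ≠ top_k_recommendations_alt scores rated_indices k

-- ===== LEMMAS AND PROOFS =====

-- the strict "score-descending, index-ascending" order that pins down the stable sort
def pvR (a b : Int × Int) : Prop := b.2 < a.2 ∨ (a.2 = b.2 ∧ a.1 < b.1)

theorem pvInsertBy_pairwise (x : Int × Int) (acc : List (Int × Int))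
    (hp : acc.Pairwise pvR) (hlt : ∀ a ∈ acc, a.1 < x.1) :
    (PySem.List.insertBy (fun a b => decide ((b.2 : Int) < a.2)) x acc).Pairwise pvR := by
  induction acc with
  | nil => simp [PySem.List.insertBy]
  | cons y ys ih =>
    simp only [PySem.List.insertBy]
    by_cases h : (y.2 : Int) < x.2
    · simp only [h, decide_true, if_pos]
      rw [List.pairwise_cons]
      refine ⟨?_, hp⟩
      intro z hz
      rw [List.mem_cons] at hz
      have hp' := hp
      rw [List.pairwise_cons] at hp'
      rcases hz with hz | hz
      · subst hz; exact Or.inl h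
      · have := hp'.1 z hz
        rcases this with h1 | ⟨h1, _⟩
        · exact Or.inl (lt_trans h1 h)
        · exact Or.inl (h1 ▸ h)
    · simp only [h, decide_false, if_neg, Bool.false_eq_true, not_false_iff]
      rw [List.pairwise_cons] at hp
      obtain ⟨hy, hys⟩ := hp
      constructor
      · intro z hz
        rw [PySem.List.mem_insertBy] at hz
        rcases hz with hz | hz
        · subst hz
          rcases lt_or_eq_of_le (not_lt.mp h) with h2 | h2
          · exact Or.inl h2
          · exact Or.inr ⟨h2.symm, hlt y (by simp)⟩
        · exact hy z hz
      · exact ih hys (fun a ha => hlt a (by simp [ha]))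

theorem pvSorted_pairwise (l : List (Int × Int))
    (h : l.Pairwise (fun p q => p.1 < q.1)) :
    (PySem.List.sorted l (fun x => x.2) true).Pairwise pvR := by
  rw [PySem.List.sorted_rev_eq_foldl_insertBy]
  suffices H : ∀ (l acc : List (Int × Int)), l.Pairwise (fun p q => p.1 < q.1) →
      acc.Pairwise pvR → (∀ a ∈ acc, ∀ x ∈ l, a.1 < x.1) →
      (l.foldl (fun acc x => PySem.List.insertBy (fun a b => decide ((b.2 : Int) < a.2)) x acc) acc).Pairwise pvR by
    exact H l [] h (by simp) (by simp)
  intro l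
  induction l with
  | nil => intro acc _ hacc _; simpa using hacc
  | cons x rest ih =>
    intro acc hl hacc hsep
    rw [List.pairwise_cons] at hl
    obtain ⟨hx, hrest⟩ := hl
    simp only [List.foldl_cons]
    apply ih _ hrest
    · exact pvInsertBy_pairwise x acc hacc (fun a ha => hsep a ha x (by simp))
    · intro a ha y hy
      rw [PySem.List.mem_insertBy] at ha
      rcases ha with ha | ha
      · subst ha; exact hx y hy
      · exact hsep a ha y (by simp [hy])

theorem pvR_antisymm {a b : Int × Int} (h1 : pvR a b) (h2 : pvR b a) : a = b := by
  exfalso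
  rcases h1 with h1 | ⟨h1, h1'⟩ <;> rcases h2 with h2 | ⟨h2, h2'⟩ <;> omega

-- what A's loop computes: the unrated indices in order, cut at k once len(res) reaches it
theorem pvLoopA_eq (rated_indices : List Int) (k : Int) (l : List (Int × Int)) (res : List Int) :
    pvLoopA rated_indices k l res =
      res ++ (if (res.length : Int) < k
        then ((l.filter (fun t => decide (t.1 ∉ rated_indices))).map (fun t => t.1)).take (k - res.length).toNat
        else (l.filter (fun t => decide (t.1 ∉ rated_indices))).map (fun t => t.1)) := by
  induction l generalizing res with
  | nil => simp [pvLoopA]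
  | cons x rest ih =>
    obtain ⟨idx, score⟩ := x
    by_cases hmem : idx ∉ rated_indices
    · have hb : decide (idx ∉ rated_indices) = true := by simp [hmem]
      simp only [pvLoopA, List.filter_cons, hb, if_true, List.map_cons]
      rw [if_pos hmem]
      by_cases hstop : ((res ++ [idx]).length : Int) = k
      · rw [if_pos hstop]
        have hlt : (res.length : Int) < k := by simp at hstop; omega
        rw [if_pos hlt]
        have : (k - res.length).toNat = 1 := by simp at hstop; omega
        simp [this]
      · rw [if_neg hstop, ih]
        by_cases hlt : (res.length : Int) < k
        · have hlt' : ((res ++ [idx]).length : Int) < k := by simp at hstop ⊢; omega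
          rw [if_pos hlt', if_pos hlt]
          have : (k - res.length).toNat = (k - (res ++ [idx]).length).toNat + 1 := by
            simp at hstop ⊢; omega
          simp [this]
        · have hlt' : ¬ ((res ++ [idx]).length : Int) < k := by simp at hlt ⊢; omega
          rw [if_neg hlt', if_neg hlt]
          simp
    · simp only [pvLoopA, List.filter_cons]
      rw [if_neg hmem, if_neg (by simp [hmem] : ¬ (decide (idx ∉ rated_indices) = true))]
      exact ih res

-- a stable descending sort commutes with filtering, on lists with strictly increasing indices
theorem pvSorted_filter_comm (l : List (Int × Int)) (p : Int × Int → Bool)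
    (h : l.Pairwise (fun p q => p.1 < q.1)) :
    PySem.List.sorted (l.filter p) (fun x => x.2) true
      = (PySem.List.sorted l (fun x => x.2) true).filter p := by
  apply List.Perm.eq_of_pairwise (le := pvR)
  · intro a b _ _ h1 h2; exact pvR_antisymm h1 h2
  · exact pvSorted_pairwise _ (h.sublist List.filter_sublist)
  · exact ((pvSorted_pairwise l h).sublist List.filter_sublist)
  · exact (PySem.List.sorted_perm _ _ _).trans
      ((PySem.List.sorted_perm l (fun x => x.2) true).filter p).symm

theorem pvFilter_set_eq (l : List (Int × Int)) (rated_indices : List Int) :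
    l.filter (fun t => decide (t.1 ∉ PySem.Set.ofList rated_indices))
      = l.filter (fun t => decide (t.1 ∉ rated_indices)) := by
  apply List.filter_congr
  intro t _
  simp [PySem.Set.mem_ofList]

-- folding the running max one step merges the first two candidates
theorem pvMax?_cons2 (x y : Int × Int) (t : List (Int × Int)) :
    PySem.List.max? (x :: y :: t) (fun t => t.2)
      = PySem.List.max? ((if x.2 < y.2 then y else x) :: t) (fun t => t.2) := by
  by_cases h : x.2 < y.2 <;> simp [PySem.List.max?, h]

-- Python's max(cand, key=score) returns the first (lowest-index) maximal-score candidate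
theorem pvMax?_first_aux : ∀ (t : List (Int × Int)) (x m : Int × Int),
    (x :: t).Pairwise (fun p q => p.1 < q.1) → m ∈ x :: t →
    (∀ y ∈ x :: t, y.2 ≤ m.2) → (∀ y ∈ x :: t, y.2 = m.2 → m.1 ≤ y.1) →
    PySem.List.max? (x :: t) (fun t => t.2) = some m
  | [], x, m, _, hmem, _, _ => by
    simp at hmem; subst hmem; simp [PySem.List.max?]
  | y :: t, x, m, hinc, hmem, hmax, hfirst => by
    rw [List.pairwise_cons] at hinc
    obtain ⟨hx1, hinc'⟩ := hinc
    rw [List.pairwise_cons] at hinc'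
    obtain ⟨hy1, hinct⟩ := hinc'
    rw [pvMax?_cons2]
    have hxm : x.2 ≤ m.2 := hmax x (by simp)
    have hym : y.2 ≤ m.2 := hmax y (by simp)
    apply pvMax?_first_aux t _ m
    · rw [List.pairwise_cons]
      refine ⟨?_, hinct⟩
      intro z hz
      split_ifs
      · exact hy1 z hz
      · exact hx1 z (by simp [hz])
    · rcases List.mem_cons.mp hmem with rfl | hmem'
      · have hnc : ¬ m.2 < y.2 := by omega
        simp [hnc]
      · rcases List.mem_cons.mp hmem' with rfl | hmem''
        · have hcond : x.2 < m.2 := by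
            rcases lt_or_eq_of_le hxm with h | h
            · exact h
            · have h1 := hfirst x (by simp) h
              have h2 := hx1 m (by simp)
              omega
          simp [hcond]
        · simp [hmem'']
    · intro z hz
      rcases List.mem_cons.mp hz with rfl | hz'
      · split_ifs <;> assumption
      · exact hmax z (by simp [hz'])
    · intro z hz
      rcases List.mem_cons.mp hz with rfl | hz'
      · split_ifs with hc
        · exact fun h => hfirst y (by simp) h
        · exact fun h => hfirst x (by simp) h
      · exact hfirst z (by simp [hz'])

theorem pvMax?_first (cand : List (Int × Int)) (m : Int × Int)
    (hinc : cand.Pairwise (fun p q => p.1 < q.1))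
    (hmem : m ∈ cand) (hmax : ∀ y ∈ cand, y.2 ≤ m.2)
    (hfirst : ∀ y ∈ cand, y.2 = m.2 → m.1 ≤ y.1) :
    PySem.List.max? cand (fun t => t.2) = some m := by
  cases cand with
  | nil => simp at hmem
  | cons x t => exact pvMax?_first_aux t x m hinc hmem hmax hfirst

-- the head of the stable descending sort is the first maximal-score candidate
theorem pvSortedHead (cand : List (Int × Int)) (h : Int × Int) (t : List (Int × Int))
    (hinc : cand.Pairwise (fun p q => p.1 < q.1))
    (hs : PySem.List.sorted cand (fun x => x.2) true = h :: t) :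
    h ∈ cand ∧ (∀ y ∈ cand, y.2 ≤ h.2) ∧ (∀ y ∈ cand, y.2 = h.2 → h.1 ≤ y.1) := by
  have hperm : (h :: t).Perm cand := hs ▸ PySem.List.sorted_perm cand (fun x => x.2) true
  have hp : (h :: t).Pairwise pvR := hs ▸ pvSorted_pairwise cand hinc
  rw [List.pairwise_cons] at hp
  have hmemiff : ∀ y, y ∈ cand ↔ y ∈ h :: t := fun y => (hperm.mem_iff).symm
  refine ⟨(hmemiff h).mpr (by simp), ?_, ?_⟩
  · intro y hy
    rcases List.mem_cons.mp ((hmemiff y).mp hy) with rfl | hy'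
    · exact le_refl _
    · rcases hp.1 y hy' with h1 | ⟨h1, _⟩
      · exact le_of_lt h1
      · exact le_of_eq h1.symm
  · intro y hy heq
    rcases List.mem_cons.mp ((hmemiff y).mp hy) with rfl | hy'
    · exact le_refl _
    · rcases hp.1 y hy' with h1 | ⟨_, h1⟩
      · omega
      · exact le_of_lt h1

-- removing the sort's head from the candidates sorts to the sort's tail
theorem pvSortedErase (cand : List (Int × Int)) (h : Int × Int) (t : List (Int × Int))
    (hinc : cand.Pairwise (fun p q => p.1 < q.1))
    (hs : PySem.List.sorted cand (fun x => x.2) true = h :: t) :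
    PySem.List.sorted (cand.erase h) (fun x => x.2) true = t := by
  have hperm : (h :: t).Perm cand := hs ▸ PySem.List.sorted_perm cand (fun x => x.2) true
  have hp : (h :: t).Pairwise pvR := hs ▸ pvSorted_pairwise cand hinc
  apply List.Perm.eq_of_pairwise (le := pvR)
  · intro a b _ _ h1 h2; exact pvR_antisymm h1 h2
  · exact pvSorted_pairwise _ (hinc.sublist List.erase_sublist)
  · exact hp.sublist (List.sublist_cons_self h t)
  · have hp2 : (cand.erase h).Perm ((h :: t).erase h) := (hperm.erase h).symm
    rw [List.erase_cons_head] at hp2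
    exact (PySem.List.sorted_perm _ _ _).trans hp2

-- what B's while-loop computes: the first (k - len(res)) indices of the sorted candidates
theorem pvLoopB_eq (k : Int) (n : Nat) : ∀ (cand : List (Int × Int)), cand.length = n →
    ∀ (res : List Int), cand.Pairwise (fun p q => p.1 < q.1) →
    pvLoopB k cand res = res ++
      (((PySem.List.sorted cand (fun t => t.2) true).map (fun t => t.1)).take (k - res.length).toNat) := by
  induction n using Nat.strong_induction_on with
  | _ n ih =>
    intro cand hlen res hinc
    rw [pvLoopB]
    by_cases hc : (res.length : Int) < k ∧ cand ≠ []
    · rw [if_pos hc]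
      obtain ⟨hk, hne⟩ := hc
      obtain ⟨h, t, hs⟩ : ∃ h t, PySem.List.sorted cand (fun x => x.2) true = h :: t := by
        cases hsc : PySem.List.sorted cand (fun x => x.2) true with
        | nil => exact absurd ((PySem.List.sorted_eq_nil_iff _ _ _).mp hsc) hne
        | cons a b => exact ⟨a, b, rfl⟩
      obtain ⟨hmem, hmax, hfirst⟩ := pvSortedHead cand h t hinc hs
      have hmx : PySem.List.max? cand (fun t => t.2) = some h :=
        pvMax?_first cand h hinc hmem hmax hfirst
      have hrm : PySem.List.remove? cand h = some (cand.erase h) :=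
        PySem.List.remove?_eq_some_erase cand h hmem
      split
      · rename_i heq; rw [hmx] at heq; exact absurd heq (by simp)
      · rename_i best heq
        rw [hmx] at heq
        injection heq with heq; subst heq
        split
        · rename_i heq2; rw [hrm] at heq2; exact absurd heq2 (by simp)
        · rename_i cand2 heq2
          rw [hrm] at heq2
          injection heq2 with heq2; subst heq2
          have hlt : (cand.erase h).length < n := by
            rw [← hlen]; exact pvRemove?_length_lt hrm
          rw [ih _ hlt (cand.erase h) rfl (res ++ [h.1])
              (hinc.sublist List.erase_sublist),
            pvSortedErase cand h t hinc hs, hs]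
          have harith : (k - (res.length : Int)).toNat
              = (k - ((res ++ [h.1]).length : Int)).toNat + 1 := by
            simp only [List.length_append, List.length_cons, List.length_nil]
            omega
          simp [harith]
    · rw [if_neg hc]
      push_neg at hc
      by_cases hk : (res.length : Int) < k
      · have hnil : cand = [] := hc hk
        subst hnil
        simp [(PySem.List.sorted_eq_nil_iff ([]:List (Int × Int)) _ _).mpr rfl]
      · have : (k - (res.length : Int)).toNat = 0 := by omega
        simp [this]

-- the shared "filtered then sorted" index list both programs produce
theorem pvMain (scores rated_indices : List Int) (k : Int) :
    top_k_recommendations scores rated_indices k =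
      (if (0 : Int) < k
        then ((((PySem.List.sorted (PySem.List.enumerate scores 0) (fun x => x.2) true).filter
          (fun t => decide (t.1 ∉ rated_indices))).map (fun t => t.1)).take k.toNat)
        else (((PySem.List.sorted (PySem.List.enumerate scores 0) (fun x => x.2) true).filter
          (fun t => decide (t.1 ∉ rated_indices))).map (fun t => t.1)))
    ∧ top_k_recommendations_alt scores rated_indices k =
      ((((PySem.List.sorted (PySem.List.enumerate scores 0) (fun x => x.2) true).filter
          (fun t => decide (t.1 ∉ rated_indices))).map (fun t => t.1)).take k.toNat) := by
  constructor
  · unfold top_k_recommendations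
    rw [pvLoopA_eq]
    simp only [List.length_nil, Nat.cast_zero, List.nil_append, Int.sub_zero]
  · unfold top_k_recommendations_alt
    rw [pvLoopB_eq k _ _ rfl []
        ((PySem.List.pairwise_lt_enumerate scores 0).sublist List.filter_sublist),
      pvFilter_set_eq,
      pvSorted_filter_comm _ _ (PySem.List.pairwise_lt_enumerate scores 0)]
    try simp

-- on inputs with no unrated index, the candidate list is empty
theorem pvFilterNil (scores rated_indices : List Int)
    (hall : ∀ i ∈ List.range scores.length, (i : Int) ∈ rated_indices) :
    (PySem.List.sorted (PySem.List.enumerate scores 0) (fun x => x.2) true).filter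
      (fun t => decide (t.1 ∉ rated_indices)) = [] := by
  rw [List.filter_eq_nil_iff]
  intro t ht
  rw [PySem.List.mem_sorted, PySem.List.mem_enumerate_iff] at ht
  obtain ⟨j, hj, hp⟩ := ht
  subst hp
  simp only [Int.zero_add, decide_eq_true_eq, not_not]
  exact hall j (List.mem_range.mpr hj)

-- ===== VERDICT (by name: the statement is the Claim_ definition above) =====
theorem top_k_recommendations_spec : Claim_unchanged_top_k_recommendations := by
  intro scores rated_indices k _
  unfold Spec_top_k_recommendations
  intro hnD
  obtain ⟨hA, hB⟩ := pvMain scores rated_indices k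
  rw [hA, hB]
  by_cases hk : (0 : Int) < k
  · rw [if_pos hk]
  · rw [if_neg hk]
    unfold D_top_k_recommendations at hnD
    push_neg at hnD
    rw [pvFilterNil scores rated_indices (hnD (by omega))]
    simp

theorem top_k_recommendations_changed : Claim_changed_top_k_recommendations := by
  unfold Claim_changed_top_k_recommendations
  refine ⟨by decide, by decide, by decide, ?_, by decide⟩
  show top_k_recommendations_alt [5] [] 0 = []
  rw [(pvMain [5] [] 0).2]
  rfl

theorem top_k_recommendations_tight : Claim_exact_top_k_recommendations := by
  intro scores rated_indices k _ hD
  obtain ⟨hk, i, hi, hnr⟩ := hD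
  obtain ⟨hA, hB⟩ := pvMain scores rated_indices k
  rw [hA, hB, if_neg (by omega), Int.toNat_of_nonpos hk]
  simp only [List.take_zero]
  intro hcontra
  rw [List.map_eq_nil_iff, List.filter_eq_nil_iff] at hcontra
  have hi' : i < scores.length := List.mem_range.mp hi
  have hmem : ((i : Int), scores.getD i 0) ∈
      PySem.List.sorted (PySem.List.enumerate scores 0) (fun x => x.2) true := by
    rw [PySem.List.mem_sorted, PySem.List.mem_enumerate_iff]
    exact ⟨i, hi', by simp [List.getElem?_eq_getElem hi']⟩
  exact absurd (by simpa using hcontra _ hmem) (by simpa using hnr)
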